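-- pv_equiv track=rewrite | github.com/juryal/aoctty | 2023_05.py | seed_exists
-- ===== SOURCE A (Python) =====
-- def seed_exists(candidate, row, conversion_map):
--     while row < 8:
--         for destination_range in conversion_map[row]:
--             if candidate in range(destination_range[0], destination_range[1]):
--                 if row != 7:
--                     return seed_exists(
--                         candidate - destination_range[2], row + 1, conversion_map
--                     )
--                 else:
--                     return True
--         row += 1
--     return False
-- ===== SOURCE B (Python) =====
-- def seed_exists(candidate, row, conversion_map):
--     for r in range(row, 8):
--         hit = next(
--             (d for d in conversion_map[r] if d[0] <= candidate < d[1]), None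
--         )
--         if hit is not None:
--             if r == 7:
--                 return True
--             candidate -= hit[2]
--     return False
-- ===== Notes on version B (the rewrite author's own statement) =====
-- stated objective: simpler
-- what changed: Replaces A's while-loop plus tail recursion (a fresh call per matched row) with a single flat `for r in range(row, 8)` loop that carries the candidate as local state, using next() over a generator for the first matching range.
import Mathlib
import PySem

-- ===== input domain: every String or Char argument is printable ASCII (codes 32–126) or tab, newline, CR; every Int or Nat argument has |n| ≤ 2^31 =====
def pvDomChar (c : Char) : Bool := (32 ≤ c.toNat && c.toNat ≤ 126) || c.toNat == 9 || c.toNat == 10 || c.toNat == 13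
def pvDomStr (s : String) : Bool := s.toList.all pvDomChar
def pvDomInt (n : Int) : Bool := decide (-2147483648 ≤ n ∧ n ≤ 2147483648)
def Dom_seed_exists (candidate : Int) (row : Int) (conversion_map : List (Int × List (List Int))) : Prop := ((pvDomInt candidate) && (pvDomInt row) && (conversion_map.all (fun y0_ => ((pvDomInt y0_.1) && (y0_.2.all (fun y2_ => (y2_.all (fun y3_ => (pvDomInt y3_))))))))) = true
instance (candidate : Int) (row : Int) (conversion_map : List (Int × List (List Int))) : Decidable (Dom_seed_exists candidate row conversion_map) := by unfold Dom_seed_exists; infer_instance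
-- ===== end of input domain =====

-- B replaces A's while-loop-plus-recursion with one flat `for r in range(row, 8)` pass carrying
-- the candidate as loop state (objective: simpler, same cost; return-value equivalence only).

-- ===== PORT A =====
-- dict lookup conversion_map[row]: first matching key (none = KeyError, excluded by Pre_)
def pvLookup (conversion_map : List (Int × List (List Int))) (row : Int) : Option (List (List Int)) :=
  (conversion_map.find? (fun p => p.1 == row)).map Prod.snd

-- A's inner `for destination_range in conversion_map[row]` loop: first range containing candidate
def pvFirstHit (candidate : Int) : List (List Int) → Option (List Int)
  | [] => none
  | dr :: rest =>
      -- `candidate in range(dr[0], dr[1])`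
      if PySem.List.pyGetD dr 0 0 ≤ candidate ∧ candidate < PySem.List.pyGetD dr 1 0 then some dr
      else pvFirstHit candidate rest

def seed_exists (candidate : Int) (row : Int) (conversion_map : List (Int × List (List Int))) : Bool :=
  if _h : row < 8 then
    match pvFirstHit candidate ((pvLookup conversion_map row).getD []) with
    | some dr =>
        if row ≠ 7 then
          seed_exists (candidate - PySem.List.pyGetD dr 2 0) (row + 1) conversion_map
        else true
    | none => seed_exists candidate (row + 1) conversion_map   -- `row += 1`, continue the while
  else false
termination_by (8 - row).toNat
decreasing_by all_goals omega

-- ===== PORT B =====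
-- B's `next((d for d in conversion_map[r] if d[0] <= candidate < d[1]), None)`
def pvNextHit (candidate : Int) (ranges : List (List Int)) : Option (List Int) :=
  ranges.find? (fun d =>
    decide (PySem.List.pyGetD d 0 0 ≤ candidate ∧ candidate < PySem.List.pyGetD d 1 0))

-- B's loop body; state = (already-returned-True flag, current candidate)
def pvStep (conversion_map : List (Int × List (List Int))) (st : Bool × Int) (r : Int) : Bool × Int :=
  if st.1 then st
  else
    match pvNextHit st.2 ((pvLookup conversion_map r).getD []) with
    | some hit => if r == 7 then (true, st.2) else (st.1, st.2 - PySem.List.pyGetD hit 2 0)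
    | none => st

def seed_exists_alt (candidate : Int) (row : Int) (conversion_map : List (Int × List (List Int))) : Bool :=
  ((PySem.List.pyRange row 8 1).foldl (pvStep conversion_map) (false, candidate)).1

-- ===== PRECONDITION & SPEC =====
-- Pre_ excludes the inputs on which A raises (KeyError when a visited row is missing from the dict,
-- IndexError when a visited range list holds a too-short sublist) by the closed-form sufficient
-- condition "every row from `row` to 7 is a key and all its sublists have length ≥ 3 (≥ 2 at row 7,
-- where index 2 is never read)", and restricts a sub-8 starting row to the puzzle's natural domain
-- 0 ≤ row.  This is slightly narrower than A's returning set (see cites): a too-short sublist that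
-- never matches, or a negative starting row with every key row..7 present, is excluded although A
-- returns (B returns the same value there).
def Pre_seed_exists (candidate : Int) (row : Int) (conversion_map : List (Int × List (List Int))) : Prop :=
  8 ≤ row ∨
    (0 ≤ row ∧ ∀ r ∈ PySem.List.pyRange row 8 1,
      ∃ rs, pvLookup conversion_map r = some rs ∧
        ∀ d ∈ rs, (if r = 7 then 2 else 3) ≤ d.length)
instance (candidate : Int) (row : Int) (conversion_map : List (Int × List (List Int))) : Decidable (Pre_seed_exists candidate row conversion_map) := by unfold Pre_seed_exists; infer_instance

def pvWitness_seed_exists : Int × Int × (List (Int × List (List Int))) :=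
  (5, 6, [(6, [[0, 10, 3]]), (7, [[0, 4]])])

def Spec_seed_exists (candidate : Int) (row : Int) (conversion_map : List (Int × List (List Int))) (out : Bool) : Prop := out = seed_exists_alt candidate row conversion_map
instance (candidate : Int) (row : Int) (conversion_map : List (Int × List (List Int))) (out : Bool) : Decidable (Spec_seed_exists candidate row conversion_map out) := by unfold Spec_seed_exists; infer_instance

-- ===== CLAIM (what is proved, stated in full; the proofs are below) =====
def Claim_equal_seed_exists : Prop := ∀ (candidate : Int) (row : Int) (conversion_map : List (Int × List (List Int))), Dom_seed_exists candidate row conversion_map → Pre_seed_exists candidate row conversion_map → Spec_seed_exists candidate row conversion_map (seed_exists candidate row conversion_map)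

-- ===== LEMMAS AND PROOFS =====

-- A's first-hit scan and B's find? scan agree
theorem pvFirstHit_eq_nextHit (candidate : Int) (l : List (List Int)) :
    pvFirstHit candidate l = pvNextHit candidate l := by
  induction l with
  | nil => rfl
  | cons dr rest ih =>
      simp only [pvFirstHit, pvNextHit, List.find?]
      by_cases h : PySem.List.pyGetD dr 0 0 ≤ candidate ∧ candidate < PySem.List.pyGetD dr 1 0
      · simp [h]
      · simp [h, pvNextHit] at ih ⊢; exact ih

theorem pv_main (fuel : Nat) (candidate row : Int) (cm : List (Int × List (List Int)))
    (hfuel : (8 - row).toNat = fuel) (hrow : 0 ≤ row)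
    (hpre : ∀ r ∈ PySem.List.pyRange row 8 1,
      ∃ rs, pvLookup cm r = some rs ∧ ∀ d ∈ rs, (if r = 7 then 2 else 3) ≤ d.length) :
    seed_exists candidate row cm = seed_exists_alt candidate row cm := by
  induction fuel generalizing candidate row with
  | zero =>
      have h8 : (8 : Int) ≤ row := by omega
      rw [seed_exists, seed_exists_alt, PySem.List.pyRange_one_eq_nil h8]
      simp [show ¬ row < 8 by omega]
  | succ n ih =>
      have hlt : row < 8 := by omega
      rw [seed_exists_alt, PySem.List.pyRange_one_cons hlt, List.foldl_cons]
      rw [seed_exists]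
      simp only [hlt, dif_pos, pvFirstHit_eq_nextHit]
      cases hhit : pvNextHit candidate ((pvLookup cm row).getD []) with
      | none =>
          have hstep : pvStep cm (false, candidate) row = (false, candidate) := by
            simp [pvStep, hhit]
          rw [hstep, ih candidate (row + 1) (by omega) (by omega)
            (fun r hr => hpre r (by rw [PySem.List.pyRange_one_cons hlt]; exact List.mem_cons_of_mem _ hr)),
            seed_exists_alt]
      | some hit =>
          by_cases h7 : row = 7
          · subst h7
            have hstep : pvStep cm (false, candidate) 7 = (true, candidate) := by
              simp [pvStep, hhit]
            rw [hstep,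
              show PySem.List.pyRange (7 + 1) 8 1 = [] from PySem.List.pyRange_one_eq_nil (by norm_num)]
            simp
          · have hstep : pvStep cm (false, candidate) row =
                (false, candidate - PySem.List.pyGetD hit 2 0) := by
              simp [pvStep, hhit, h7]
            rw [hstep]
            show (if row ≠ 7 then seed_exists (candidate - PySem.List.pyGetD hit 2 0) (row + 1) cm
              else true) = _
            rw [if_pos h7,
              ih (candidate - PySem.List.pyGetD hit 2 0) (row + 1) (by omega) (by omega)
                (fun r hr => hpre r (by rw [PySem.List.pyRange_one_cons hlt]; exact List.mem_cons_of_mem _ hr)),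
              seed_exists_alt]

-- ===== VERDICT (by name: the statement is the Claim_ definition above) =====
theorem seed_exists_spec : Claim_equal_seed_exists := by
  intro candidate row cm _hdom hpre
  unfold Spec_seed_exists
  rcases hpre with h8 | ⟨h0, hrows⟩
  · rw [seed_exists, seed_exists_alt, PySem.List.pyRange_one_eq_nil h8]
    simp [show ¬ row < 8 by omega]
  · exact pv_main (8 - row).toNat candidate row cm rfl h0 hrows
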